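-- pv_equiv track=rewrite | github.com/volcengine/verl | atropos/environments/intern_bootcamp/internbootcamp_lib/internbootcamp/bootcamp/ckuroniandimpossiblecalculation/ckuroniandimpossiblecalculation.py | _safe_compute
-- ===== SOURCE A (Python) =====
-- def _safe_compute(n, m, a):
--     """安全计算模式（限制n不超过100）"""
--     if n > 100:
--         return 0
--     product = 1
--     for i in range(n):
--         for j in range(i+1, n):
--             product = (product * abs(a[i]-a[j])) % m
--     return product
-- ===== SOURCE B (Python) =====
-- def _safe_compute(n, m, a):
--     if n > 100:
--         return 0
--     if n < 2:
--         return 1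
--     vals = a[:n]
--     # pigeonhole short-circuit: a residue collision makes the whole product divisible by m
--     if len({x % m for x in vals}) < n:
--         return 0
--     p = 1
--     while len(vals) > 1:
--         x, vals = vals[0], vals[1:]
--         for y in vals:
--             p *= abs(x - y)
--     return p % m
-- ===== Notes on version B (the rewrite author's own statement) =====
-- stated objective: alternative
-- what changed: B slices off the first n values, returns 0 immediately when a set of residues mod m shows a collision (pigeonhole: the product is divisible by m), and otherwise computes the exact big-integer product of pairwise absolute differences with a head-and-rest loop, taking a single mod at the end, instead of A's index-based double loop that reduces mod m at every step.
import Mathlib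
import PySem

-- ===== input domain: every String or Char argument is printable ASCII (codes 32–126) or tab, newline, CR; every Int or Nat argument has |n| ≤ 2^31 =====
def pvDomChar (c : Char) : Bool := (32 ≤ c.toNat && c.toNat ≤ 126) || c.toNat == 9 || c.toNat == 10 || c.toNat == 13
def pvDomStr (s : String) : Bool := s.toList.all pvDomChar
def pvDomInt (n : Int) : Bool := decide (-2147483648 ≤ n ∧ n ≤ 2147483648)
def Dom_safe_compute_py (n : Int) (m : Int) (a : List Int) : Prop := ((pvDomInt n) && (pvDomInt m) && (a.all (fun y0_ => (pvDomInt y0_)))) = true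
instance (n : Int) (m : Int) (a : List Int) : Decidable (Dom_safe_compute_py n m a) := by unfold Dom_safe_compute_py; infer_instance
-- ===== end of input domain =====

-- B replaces A's per-step modular double loop by a residue-collision (pigeonhole) short-circuit
-- plus one final mod of the exact pair product; equivalence of return values is proved on Pre_.

-- ===== PORT A =====
def safe_compute_py (n : Int) (m : Int) (a : List Int) : Int :=
  if n > 100 then 0
  else
    (PySem.List.pyRange 0 n 1).foldl (fun product i =>
      (PySem.List.pyRange (i + 1) n 1).foldl (fun product j =>
        PySem.Int.mod (product * |PySem.List.pyGetD a i 0 - PySem.List.pyGetD a j 0|) m) product) 1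

-- ===== PORT B =====
-- the 'while len(vals) > 1' head-and-rest loop of Source B
def pairLoop (p : Int) : List Int → Int
  | [] => p
  | [_] => p
  | x :: rest => pairLoop (rest.foldl (fun q y => q * |x - y|) p) rest

def safe_compute_py_alt (n : Int) (m : Int) (a : List Int) : Int :=
  if n > 100 then 0
  else if n < 2 then 1
  else
    let vals := PySem.List.slice a none (some n)
    if ((PySem.Set.ofList (vals.map (fun x => PySem.Int.mod x m))).length : Int) < n then 0
    else PySem.Int.mod (pairLoop 1 vals) m

-- ===== PRECONDITION & SPEC =====
-- Pre_ excludes exactly the inputs where A raises: 2 ≤ n ≤ 100 with n > len(a) (IndexError)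
-- or with m = 0 (ZeroDivisionError).
def Pre_safe_compute_py (n : Int) (m : Int) (a : List Int) : Prop :=
  (2 ≤ n ∧ n ≤ 100) → ((n : Int) ≤ a.length ∧ m ≠ 0)
instance (n : Int) (m : Int) (a : List Int) : Decidable (Pre_safe_compute_py n m a) := by
  unfold Pre_safe_compute_py; infer_instance

def pvWitness_safe_compute_py : Int × Int × List Int := (3, 5, [1, 2, 4])

def Spec_safe_compute_py (n : Int) (m : Int) (a : List Int) (out : Int) : Prop := out = safe_compute_py_alt n m a
instance (n : Int) (m : Int) (a : List Int) (out : Int) : Decidable (Spec_safe_compute_py n m a out) := by unfold Spec_safe_compute_py; infer_instance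

-- ===== CLAIM (what is proved, stated in full; the proofs are below) =====
def Claim_equal_safe_compute_py : Prop := ∀ (n : Int) (m : Int) (a : List Int), Dom_safe_compute_py n m a → Pre_safe_compute_py n m a → Spec_safe_compute_py n m a (safe_compute_py n m a)

-- ===== LEMMAS AND PROOFS =====

-- product of |x - y| over all unordered pairs of l, peeling the head
def pairProd : List Int → Int
  | [] => 1
  | x :: xs => (xs.map (fun y => |x - y|)).prod * pairProd xs

theorem foldl_mul_eq (f : Int → Int) (l : List Int) (p : Int) :
    l.foldl (fun q y => q * f y) p = p * (l.map f).prod := by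
  induction l generalizing p with
  | nil => simp
  | cons x t ih => simp [ih, mul_assoc]

theorem pairLoop_eq (l : List Int) (p : Int) : pairLoop p l = p * pairProd l := by
  induction l generalizing p with
  | nil => simp [pairLoop, pairProd]
  | cons x rest ih =>
    cases rest with
    | nil => simp [pairLoop, pairProd]
    | cons y t =>
      have h0 : pairLoop p (x :: y :: t) =
          pairLoop ((y :: t).foldl (fun q z => q * |x - z|) p) (y :: t) := rfl
      rw [h0, ih, foldl_mul_eq]
      simp only [pairProd]
      ring

theorem pairProd_append (l : List Int) (z : Int) :
    pairProd (l ++ [z]) = pairProd l * (l.map (fun y => |y - z|)).prod := by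
  induction l with
  | nil => simp [pairProd]
  | cons x t ih =>
    simp only [List.cons_append, pairProd, List.map_append, List.map_cons, List.map_nil,
      List.prod_append, List.prod_cons, List.prod_nil, ih, List.map]
    rw [abs_sub_comm x z]; ring

theorem foldl_nested (g : Int → List Int) (f : Int → Int → Int) (l : List Int) (init : Int) :
    l.foldl (fun s i => (g i).foldl f s) init = (l.flatMap g).foldl f init := by
  induction l generalizing init with
  | nil => rfl
  | cons x t ih => simp [List.flatMap_cons, List.foldl_append, ih]

theorem prod_flatMap_eq (g : Int → List Int) (l : List Int) :
    (l.flatMap g).prod = (l.map (fun i => (g i).prod)).prod := by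
  induction l with
  | nil => rfl
  | cons x t ih => simp [List.flatMap_cons, List.prod_append, ih]

theorem fmod_mul_fmod (a c m : Int) : ((a.fmod m) * c).fmod m = (a * c).fmod m := by
  have h : a.fmod m = a - m * a.fdiv m := by
    have := Int.fmod_add_fdiv a m; linarith
  have : (a.fmod m) * c = a * c + m * (-(a.fdiv m) * c) := by rw [h]; ring
  rw [this, Int.add_mul_fmod_self_left]

theorem modfold (m : Int) (L : List Int) (hL : L ≠ []) (p : Int) :
    L.foldl (fun q d => (q * d).fmod m) p = (p * L.prod).fmod m := by
  induction L generalizing p with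
  | nil => exact absurd rfl hL
  | cons d t ih =>
    cases t with
    | nil => simp [List.foldl]
    | cons e t' =>
      rw [List.foldl_cons, ih (by simp) _, fmod_mul_fmod]; simp [mul_assoc]

theorem fmod_congr_sub (x y m : Int) (h : x.fmod m = y.fmod m) : m ∣ x - y := by
  have hx := Int.fmod_add_fdiv x m
  have hy := Int.fmod_add_fdiv y m
  exact ⟨x.fdiv m - y.fdiv m, by linarith [h]⟩

theorem pigeon (m : Int) (l : List Int) (h : ¬ (l.map (fun x => Int.fmod x m)).Nodup) :
    m ∣ pairProd l := by
  induction l with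
  | nil => simp at h
  | cons x t ih =>
    rw [List.map_cons, List.nodup_cons] at h
    push_neg at h
    rw [pairProd]
    by_cases hmem : Int.fmod x m ∈ t.map (fun x => Int.fmod x m)
    · obtain ⟨y, hy, hfy⟩ := List.mem_map.mp hmem
      have hdvd : m ∣ |x - y| := (dvd_abs m (x - y)).mpr (fmod_congr_sub x y m hfy.symm)
      exact Dvd.dvd.mul_right (hdvd.trans (List.dvd_prod (List.mem_map.mpr ⟨y, hy, rfl⟩))) _
    · exact Dvd.dvd.mul_left (ih (h hmem)) _

-- the pair product over index ranges equals pairProd of the prefix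
theorem idx_pairProd (a : List Int) (k : Nat) (hk : k ≤ a.length) :
    ((PySem.List.pyRange 0 (k : Int) 1).flatMap (fun i =>
      (PySem.List.pyRange (i + 1) (k : Int) 1).map
        (fun j => |PySem.List.pyGetD a i 0 - PySem.List.pyGetD a j 0|))).prod
    = pairProd (a.take k) := by
  induction k with
  | zero => simp [PySem.List.pyRange_one_eq_nil, pairProd]
  | succ k ih =>
    have hk' : k ≤ a.length := Nat.le_of_succ_le hk
    have hklt : k < a.length := hk
    have hc : ((k + 1 : Nat) : Int) = (k : Int) + 1 := by push_cast; ring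
    rw [hc, PySem.List.pyRange_one_succ_right (by positivity), List.flatMap_append]
    rw [List.prod_append]
    have hlast : (([(k : Int)].flatMap (fun i =>
        (PySem.List.pyRange (i + 1) ((k : Int) + 1) 1).map
          (fun j => |PySem.List.pyGetD a i 0 - PySem.List.pyGetD a j 0|))).prod) = 1 := by
      simp [PySem.List.pyRange_one_eq_nil (le_refl ((k : Int) + 1))]
    rw [hlast, mul_one]
    rw [prod_flatMap_eq]
    have hsplit : ∀ i ∈ PySem.List.pyRange 0 (k : Int) 1,
        ((PySem.List.pyRange (i + 1) ((k : Int) + 1) 1).map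
          (fun j => |PySem.List.pyGetD a i 0 - PySem.List.pyGetD a j 0|)).prod
        = ((PySem.List.pyRange (i + 1) (k : Int) 1).map
            (fun j => |PySem.List.pyGetD a i 0 - PySem.List.pyGetD a j 0|)).prod
          * |PySem.List.pyGetD a i 0 - PySem.List.pyGetD a (k : Int) 0| := by
      intro i hi
      obtain ⟨hi0, hik⟩ := PySem.List.mem_pyRange_one.mp hi
      rw [PySem.List.pyRange_one_succ_right (by omega), List.map_append, List.prod_append]
      simp
    rw [List.map_congr_left hsplit, List.prod_map_mul]
    rw [← prod_flatMap_eq, ih hk']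
    have hgetk : PySem.List.pyGetD a (k : Int) 0 = a[k] := by
      rw [PySem.List.pyGetD_natCast, List.getD_eq_getElem?_getD, List.getElem?_eq_getElem hklt]
      rfl
    have hmap : (List.map (fun i => |PySem.List.pyGetD a i 0 - PySem.List.pyGetD a (k : Int) 0|)
        (PySem.List.pyRange 0 (k : Int) 1)) = (a.take k).map (fun y => |y - a[k]|) := by
      have h1 := PySem.List.map_pyGetD_pyRange_zero (a.take k) 0
      have hlen : PySem.List.len (a.take k) = (k : Int) := by
        show ((a.take k).length : Int) = (k : Int)
        rw [List.length_take]; omega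
      rw [hlen] at h1
      conv_rhs => rw [← h1, List.map_map]
      apply List.map_congr_left
      intro j hj
      obtain ⟨hj0, hjk⟩ := PySem.List.mem_pyRange_one.mp hj
      have hj' : j = ((j.toNat : Nat) : Int) := (Int.toNat_of_nonneg hj0).symm
      have hjn : j.toNat < k := by omega
      rw [hgetk, hj']
      simp only [Function.comp_apply, PySem.List.pyGetD_natCast, List.getD_eq_getElem?_getD,
        List.getElem?_take, if_pos hjn]
    rw [hmap]
    have htake : a.take (k + 1) = a.take k ++ [a[k]] := by
      rw [List.take_succ, List.getElem?_eq_getElem hklt]; rfl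
    rw [htake, pairProd_append]

theorem safe_compute_py_spec : Claim_equal_safe_compute_py := by
  intro n m a _ hpre
  unfold Spec_safe_compute_py safe_compute_py safe_compute_py_alt
  by_cases h100 : n > 100
  · simp [h100]
  · rw [if_neg h100, if_neg h100]
    by_cases h2 : n < 2
    · rw [if_pos h2]
      rcases (by omega : n ≤ 0 ∨ n = 1) with h | h
      · rw [PySem.List.pyRange_one_eq_nil h]; rfl
      · subst h
        rw [show PySem.List.pyRange 0 1 = [(0 : Int)] from by
          rw [PySem.List.pyRange_one_cons (by norm_num),
            PySem.List.pyRange_one_eq_nil (by norm_num)]]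
        simp [PySem.List.pyRange_one_eq_nil]
    · rw [if_neg h2]
      obtain ⟨hlen, hm⟩ := hpre ⟨by omega, by omega⟩
      have hn0 : (0 : Int) ≤ n := by omega
      have hnk : ((n.toNat : Nat) : Int) = n := Int.toNat_of_nonneg hn0
      have hkle : n.toNat ≤ a.length := by omega
      rw [PySem.List.slice_to a hn0]
      simp only [PySem.Int.mod]
      have hfun : (fun (product i : Int) =>
          (PySem.List.pyRange (i + 1) n 1).foldl (fun product j =>
            (product * |PySem.List.pyGetD a i 0 - PySem.List.pyGetD a j 0|).fmod m) product)
          = (fun (s i : Int) =>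
            ((PySem.List.pyRange (i + 1) n 1).map
              (fun j => |PySem.List.pyGetD a i 0 - PySem.List.pyGetD a j 0|)).foldl
              (fun q d => (q * d).fmod m) s) := by
        funext s i; rw [List.foldl_map]
      have hmem : |PySem.List.pyGetD a 0 0 - PySem.List.pyGetD a 1 0|
          ∈ (PySem.List.pyRange 0 n 1).flatMap (fun i =>
            (PySem.List.pyRange (i + 1) n 1).map
              (fun j => |PySem.List.pyGetD a i 0 - PySem.List.pyGetD a j 0|)) := by
        refine List.mem_flatMap.mpr ⟨0, PySem.List.mem_pyRange_one.mpr ⟨le_refl 0, by omega⟩, ?_⟩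
        exact List.mem_map.mpr ⟨1, PySem.List.mem_pyRange_one.mpr ⟨by norm_num, by omega⟩, rfl⟩
      have hidx := idx_pairProd a n.toNat hkle
      rw [hnk] at hidx
      rw [hfun, foldl_nested, modfold m _ (List.ne_nil_of_mem hmem), one_mul, hidx]
      by_cases hcond : (((PySem.Set.ofList ((a.take n.toNat).map
          (fun x => Int.fmod x m))).length : Nat) : Int) < n
      · rw [if_pos hcond]
        have hnd : ¬ ((a.take n.toNat).map (fun x => Int.fmod x m)).Nodup := by
          intro hnd
        /- a nodup residue list would be a permutation of its dedup, contradicting hcond -/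
          have hperm := (List.perm_ext_iff_of_nodup
            (PySem.Set.nodup_ofList ((a.take n.toNat).map (fun x => Int.fmod x m))) hnd).mpr
            (PySem.Set.mem_ofList ((a.take n.toNat).map (fun x => Int.fmod x m)))
          have hlen2 := hperm.length_eq
          have hlen3 : ((a.take n.toNat).map (fun x => Int.fmod x m)).length = n.toNat := by
            rw [List.length_map, List.length_take]; omega
          omega
        exact (PySem.Int.mod_eq_zero_iff_dvd _ m).mpr (pigeon m _ hnd)
      · rw [if_neg hcond, pairLoop_eq, one_mul]
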